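-- pv_equiv track=rewrite | github.com/liujch1998/infini-gram | pkg/infini_gram/engine.py | check_cnf
-- ===== SOURCE A (Python) =====
-- def check_cnf(cnf):
--     if not (type(cnf) == list and len(cnf) > 0):
--         return False
--     for disj_clause in cnf:
--         if not (type(disj_clause) == list and len(disj_clause) > 0):
--             return False
--         for query_ids in disj_clause:
--             if not (type(query_ids) == list and len(query_ids) > 0):
--                 return False
--             for q in query_ids:
--                 if not (type(q) == int and 0 <= q and q < 65535):
--                     return False
--     return True
-- ===== SOURCE B (Python) =====
-- def check_cnf(cnf):
--     def rec(x, depth):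
--         if depth < 3:
--             if not (type(x) == list and len(x) > 0):
--                 return False
--             return all(rec(e, depth + 1) for e in x)
--         return type(x) == int and type(x) != bool and 0 <= x < 65535
--     return rec(cnf, 0)
-- ===== Notes on version B (the rewrite author's own statement) =====
-- stated objective: simpler
-- what changed: Replaces the three hand-unrolled nested loops with one recursive helper rec(x, depth) that descends over the nesting level, validating list-ness/nonemptiness at depths 0-2 and the integer range at depth 3.
import Mathlib
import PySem

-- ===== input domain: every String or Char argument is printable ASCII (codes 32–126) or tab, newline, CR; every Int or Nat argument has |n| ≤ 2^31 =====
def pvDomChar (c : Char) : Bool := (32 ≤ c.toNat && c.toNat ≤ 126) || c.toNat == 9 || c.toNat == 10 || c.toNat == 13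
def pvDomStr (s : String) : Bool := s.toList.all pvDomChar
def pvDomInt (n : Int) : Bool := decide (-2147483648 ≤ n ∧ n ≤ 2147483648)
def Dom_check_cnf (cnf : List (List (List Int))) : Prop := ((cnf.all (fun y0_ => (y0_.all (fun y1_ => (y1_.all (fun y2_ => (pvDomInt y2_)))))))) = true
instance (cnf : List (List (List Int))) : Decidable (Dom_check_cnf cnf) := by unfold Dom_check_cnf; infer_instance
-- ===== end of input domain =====

-- ===== PORT A =====
-- B changes: one recursive descent over the nesting depth instead of three hand-unrolled
-- nested loops (objective: simpler). Under the type convention the argument is always a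
-- List (List (List Int)), so Python's type()==list / type()==int checks are identically true.
-- Loop over the innermost clause, returning False at the first out-of-range element (A's inner loop).
def check_cnf_loop3 : List Int → Bool
  | [] => true
  | q :: rest => if ¬ (0 ≤ q ∧ q < 65535) then false else check_cnf_loop3 rest

-- A's middle loop over query_ids lists.
def check_cnf_loop2 : List (List Int) → Bool
  | [] => true
  | query_ids :: rest =>
      if ¬ (query_ids.length > 0) then false
      else if check_cnf_loop3 query_ids = false then false
      else check_cnf_loop2 rest

-- A's outer loop over disjunctive clauses.
def check_cnf_loop1 : List (List (List Int)) → Bool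
  | [] => true
  | disj_clause :: rest =>
      if ¬ (disj_clause.length > 0) then false
      else if check_cnf_loop2 disj_clause = false then false
      else check_cnf_loop1 rest

def check_cnf (cnf : List (List (List Int))) : Bool :=
  if ¬ (cnf.length > 0) then false else check_cnf_loop1 cnf

-- ===== PORT B =====
-- Source B's rec(x, depth): the depth parameter selects the type of x, so it becomes one
-- helper per depth, each "nonempty and all children recursively valid" / the leaf test.
def check_cnf_rec3 (x : Int) : Bool := 0 ≤ x && x < 65535

def check_cnf_rec2 (x : List Int) : Bool := x ≠ [] && x.all check_cnf_rec3

def check_cnf_rec1 (x : List (List Int)) : Bool := x ≠ [] && x.all check_cnf_rec2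

def check_cnf_alt (cnf : List (List (List Int))) : Bool :=
  cnf ≠ [] && cnf.all check_cnf_rec1

-- ===== PRECONDITION & SPEC =====
def Spec_check_cnf (cnf : List (List (List Int))) (out : Bool) : Prop := out = check_cnf_alt cnf
instance (cnf : List (List (List Int))) (out : Bool) : Decidable (Spec_check_cnf cnf out) := by unfold Spec_check_cnf; infer_instance

-- ===== CLAIM (what is proved, stated in full; the proofs are below) =====
def Claim_equal_check_cnf : Prop := ∀ (cnf : List (List (List Int))), Dom_check_cnf cnf → Spec_check_cnf cnf (check_cnf cnf)

-- ===== LEMMAS AND PROOFS =====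
theorem loop3_eq (xs : List Int) : check_cnf_loop3 xs = xs.all check_cnf_rec3 := by
  induction xs with
  | nil => rfl
  | cons q rest ih =>
      simp only [check_cnf_loop3, List.all_cons, check_cnf_rec3]
      by_cases h : 0 ≤ q ∧ q < 65535
      · simp [h, ih]
      · simp only [if_pos h]
        rcases not_and_or.mp h with h1 | h2
        · simp [h1]
        · simp [h2]

theorem loop2_eq (xs : List (List Int)) : check_cnf_loop2 xs = xs.all check_cnf_rec2 := by
  induction xs with
  | nil => rfl
  | cons q rest ih =>
      rcases q with _ | ⟨a, q⟩
      · simp [check_cnf_loop2, check_cnf_rec2]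
      · cases hb : (a :: q).all check_cnf_rec3 with
        | false => simp [check_cnf_loop2, loop3_eq, check_cnf_rec2, hb]
        | true => simp [check_cnf_loop2, loop3_eq, check_cnf_rec2, hb, ih]

theorem loop1_eq (xs : List (List (List Int))) : check_cnf_loop1 xs = xs.all check_cnf_rec1 := by
  induction xs with
  | nil => rfl
  | cons q rest ih =>
      rcases q with _ | ⟨a, q⟩
      · simp [check_cnf_loop1, check_cnf_rec1]
      · cases hb : (a :: q).all check_cnf_rec2 with
        | false => simp [check_cnf_loop1, loop2_eq, check_cnf_rec1, hb]
        | true => simp [check_cnf_loop1, loop2_eq, check_cnf_rec1, hb, ih]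

-- ===== VERDICT (by name: the statement is the Claim_ definition above) =====
theorem check_cnf_spec : Claim_equal_check_cnf := by
  intro cnf _
  unfold Spec_check_cnf check_cnf check_cnf_alt
  rcases cnf with _ | ⟨c, cnf⟩
  · rfl
  · simp [loop1_eq, check_cnf_rec1]
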